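-- pv_equiv track=rewrite | github.com/ozan/solutions | rosalind/rnas.py | rnas
-- ===== SOURCE A (Python) =====
-- match = dict(zip('AUCG', ('U', 'AG', 'G', 'UC')))
--
-- def rnas(s):
--     """
--     Memo[i][j] -> Matches in range [j, i)
--     """
--     memo = [[1 for _ in range(len(s) + 1)] for _ in range(len(s) + 1)]
--
--     for end in range(0, len(s) + 1):
--         for start in range(end-1, -1, -1):
--             exp = match[s[start]]
--             tot = memo[end][start+1]
--             for i in range(start+4, end):
--                 if s[i] in exp:
--                     tot += memo[i][start+1] * memo[end][i+1]
--             memo[end][start] = tot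
--     return memo[len(s)][0]
-- ===== SOURCE B (Python) =====
-- match = dict(zip('AUCG', ('U', 'AG', 'G', 'UC')))
--
-- def rnas(s):
--     # Top-down memoized recursion over intervals [start, end) instead of a bottom-up table.
--     memo = {}
--
--     def f(start, end):
--         if end - start < 5:
--             return 1  # too short to form any pair with the required 3-base gap
--         key = (start, end)
--         if key in memo:
--             return memo[key]
--         exp = match[s[start]]
--         tot = f(start + 1, end)
--         for i in range(start + 4, end):
--             if s[i] in exp:
--                 tot += f(start + 1, i) * f(i + 1, end)
--         memo[key] = tot
--         return tot
--
--     return f(0, len(s))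
-- ===== Notes on version B (the rewrite author's own statement) =====
-- stated objective: alternative
-- what changed: Replaced the bottom-up (n+1)x(n+1) DP table filled by triple nested loops with a top-down memoized recursion f(start,end) over intervals that only computes the subproblems actually reachable from (0, len(s)) and short-circuits intervals shorter than 5 to 1.
import Mathlib
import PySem

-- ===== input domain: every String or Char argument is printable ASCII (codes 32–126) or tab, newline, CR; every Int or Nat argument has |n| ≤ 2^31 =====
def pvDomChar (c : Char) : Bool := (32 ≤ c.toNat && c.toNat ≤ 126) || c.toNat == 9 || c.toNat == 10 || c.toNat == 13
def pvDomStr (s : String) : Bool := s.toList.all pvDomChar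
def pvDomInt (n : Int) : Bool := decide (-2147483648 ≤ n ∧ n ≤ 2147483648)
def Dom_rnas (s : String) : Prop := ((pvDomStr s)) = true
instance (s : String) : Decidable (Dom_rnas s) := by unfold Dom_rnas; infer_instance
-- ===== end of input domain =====

-- B replaces A's bottom-up (n+1)×(n+1) DP table (triple nested loops) by a top-down
-- memoized recursion over intervals; return values agree on all strings over 'AUCG'.

-- shared module-level constant: match = dict(zip('AUCG', ('U', 'AG', 'G', 'UC')))
def pvMatch : PySem.Dict Char String :=
  PySem.Dict.ofList [('A', "U"), ('U', "AG"), ('C', "G"), ('G', "UC")]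

-- "s[i] in match[s[start]]" — s[i] is one char, so substring test = char membership;
-- indices are always in range in both programs, and under Pre_ the dict lookup hits,
-- so the defaults are never consulted.
def pvPairs (cs : List Char) (start i : Nat) : Bool :=
  (((pvMatch.get? (cs.getD start ' ')).getD "").toList).contains (cs.getD i ' ')

-- ===== PORT A =====
-- memo[e][st] access / in-place update (all indices used are in range)
def pvGet2 (memo : List (List Int)) (e st : Nat) : Int := (memo.getD e []).getD st 1
def pvSet2 (memo : List (List Int)) (e st : Nat) (v : Int) : List (List Int) :=
  memo.set e ((memo.getD e []).set st v)

-- body of the 'start' loop: tot = memo[end][start+1]; for i in range(start+4, end): … ; memo[end][start] = tot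
def pvRowStep (cs : List Char) (e start : Nat) (memo : List (List Int)) : List (List Int) :=
  let tot := (List.range' (start+4) (e - (start+4))).foldl
      (fun t i => if pvPairs cs start i then t + pvGet2 memo i (start+1) * pvGet2 memo e (i+1) else t)
      (pvGet2 memo e (start+1))
  pvSet2 memo e start tot

-- for start in range(end-1, -1, -1): fuel k means starts k-1, k-2, …, 0 remain
def pvRowLoop (cs : List Char) (e : Nat) : Nat → List (List Int) → List (List Int)
  | 0, memo => memo
  | k+1, memo => pvRowLoop cs e k (pvRowStep cs e k memo)

def rnas (s : String) : Int :=
  let cs := s.toList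
  let n := cs.length
  let memo0 := List.replicate (n+1) (List.replicate (n+1) (1 : Int))
  let memo := (List.range (n+1)).foldl (fun m e => pvRowLoop cs e e m) memo0
  pvGet2 memo n 0

-- ===== PORT B =====
-- f(start, end) with dict memo threaded through; the fuel argument only makes the
-- recursion structural (the top call passes |s|+1, always enough since e-start shrinks).
def bRec (cs : List Char) : Nat → Nat → Nat → PySem.Dict (Nat × Nat) Int → Int × PySem.Dict (Nat × Nat) Int
  | 0, _, _, memo => (1, memo)
  | fuel+1, start, e, memo =>
    if e - start < 5 then (1, memo)
    else
      match memo.get? (start, e) with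
      | some v => (v, memo)
      | none =>
        let r1 := bRec cs fuel (start+1) e memo
        let r2 := (List.range' (start+4) (e - (start+4))).foldl
          (fun tm i =>
            if pvPairs cs start i then
              let ra := bRec cs fuel (start+1) i tm.2
              let rb := bRec cs fuel (i+1) e ra.2
              (tm.1 + ra.1 * rb.1, rb.2)
            else tm)
          r1
        (r2.1, r2.2.insert (start, e) r2.1)

def rnas_alt (s : String) : Int :=
  let cs := s.toList
  (bRec cs (cs.length + 1) 0 cs.length PySem.Dict.empty).1

-- ===== PRECONDITION & SPEC =====
-- Pre_: exactly the inputs on which Python A returns — on any other nonempty string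
-- match[s[start]] raises KeyError (the empty string, where A returns 1, satisfies Pre_).
def Pre_rnas (s : String) : Prop := (s.toList.all (fun c => c == 'A' || c == 'U' || c == 'C' || c == 'G')) = true
instance (s : String) : Decidable (Pre_rnas s) := by unfold Pre_rnas; infer_instance
def pvWitness_rnas : String := "GCAU"

def Spec_rnas (s : String) (out : Int) : Prop := out = rnas_alt s
instance (s : String) (out : Int) : Decidable (Spec_rnas s out) := by unfold Spec_rnas; infer_instance

-- ===== CLAIM (what is proved, stated in full; the proofs are below) =====
def Claim_equal_rnas : Prop := ∀ (s : String), Dom_rnas s → Pre_rnas s → Spec_rnas s (rnas s)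

-- ===== LEMMAS AND PROOFS =====

-- the mathematical interval count both ports compute: cnt cs start e = #noncrossing
-- matchings of cs[start:e) (fuel-indexed so the recursion is structural)
def cntF (cs : List Char) : Nat → Nat → Nat → Int
  | 0, _, _ => 1
  | fuel+1, start, e =>
    if e ≤ start then 1
    else cntF cs fuel (start+1) e +
      (List.range' (start+4) (e - (start+4))).foldl
        (fun t i => if pvPairs cs start i then t + cntF cs fuel (start+1) i * cntF cs fuel (i+1) e else t) 0

def cnt (cs : List Char) (start e : Nat) : Int := cntF cs (e - start) start e

theorem cntF_irrel (cs : List Char) : ∀ f1 f2 start e, e - start ≤ f1 → e - start ≤ f2 →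
    cntF cs f1 start e = cntF cs f2 start e := by
  intro f1
  induction f1 using Nat.strong_induction_on with
  | _ f1 IH =>
    intro f2 start e h1 h2
    match f1, f2 with
    | 0, 0 => rfl
    | 0, g2+1 =>
      have he : e ≤ start := by omega
      simp [cntF, he]
    | g1+1, 0 =>
      have he : e ≤ start := by omega
      simp [cntF, he]
    | g1+1, g2+1 =>
      by_cases hle : e ≤ start
      · simp [cntF, hle]
      · simp only [cntF, if_neg hle]
        congr 1
        · exact IH g1 (by omega) g2 (start+1) e (by omega) (by omega)
        · apply PySem.List.foldl_congr_mem'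
          intro i hi acc
          have hb := List.mem_range'_1.mp hi
          by_cases hp : pvPairs cs start i
          · simp only [hp, if_true]
            rw [IH g1 (by omega) g2 (start+1) i (by omega) (by omega),
                IH g1 (by omega) g2 (i+1) e (by omega) (by omega)]
          · simp [hp]

theorem cnt_of_le (cs : List Char) (start e : Nat) (h : e ≤ start) : cnt cs start e = 1 := by
  simp [cnt, Nat.sub_eq_zero_of_le h, cntF]

theorem cnt_unfold (cs : List Char) (start e : Nat) (h : start < e) :
    cnt cs start e = cnt cs (start+1) e +
      (List.range' (start+4) (e - (start+4))).foldl
        (fun t i => if pvPairs cs start i then t + cnt cs (start+1) i * cnt cs (i+1) e else t) 0 := by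
  obtain ⟨m, hm⟩ : ∃ m, e - start = m + 1 := ⟨e - start - 1, by omega⟩
  rw [cnt, hm]
  simp only [cntF, if_neg (by omega : ¬ e ≤ start)]
  congr 1
  · exact cntF_irrel cs m (e - (start+1)) (start+1) e (by omega) (by omega)
  · apply PySem.List.foldl_congr_mem'
    intro i hi acc
    have hb := List.mem_range'_1.mp hi
    by_cases hp : pvPairs cs start i
    · simp only [hp, if_true]
      rw [cntF_irrel cs m (i - (start+1)) (start+1) i (by omega) (by omega),
          cntF_irrel cs m (e - (i+1)) (i+1) e (by omega) (by omega)]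
      rfl
    · simp [hp]

theorem cnt_short (cs : List Char) : ∀ d start e, e - start ≤ d → e - start < 5 → cnt cs start e = 1 := by
  intro d
  induction d with
  | zero => intro start e h1 _; exact cnt_of_le cs start e (by omega)
  | succ d IH =>
    intro start e h1 h5
    by_cases hle : e ≤ start
    · exact cnt_of_le cs start e hle
    · rw [cnt_unfold cs start e (by omega)]
      have hempty : e - (start+4) = 0 := by omega
      rw [hempty]
      simp [IH (start+1) e (by omega) (by omega)]

-- a foldl of "maybe add" pulls a constant out of its initial value
theorem foldl_if_add (l : List Nat) (p : Nat → Bool) (g : Nat → Int) (a b : Int) :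
    l.foldl (fun t i => if p i then t + g i else t) (a + b) =
      a + l.foldl (fun t i => if p i then t + g i else t) b := by
  have hfun : (fun (t : Int) i => if p i then t + g i else t) =
      fun (t : Int) i => t + (if p i then g i else 0) := by
    funext t i; split <;> simp
  rw [hfun, PySem.List.foldl_add, PySem.List.foldl_add]
  ring

-- every value stored in the memo dict is the interval count for its key
def GoodMemo (cs : List Char) (m : PySem.Dict (Nat × Nat) Int) : Prop :=
  ∀ st e v, m.get? (st, e) = some v → v = cnt cs st e

-- folding a state-threading step that is pure modulo an invariant
theorem foldl_pair_good (P : PySem.Dict (Nat × Nat) Int → Prop) (f : Int → Nat → Int)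
    (g : Int × PySem.Dict (Nat × Nat) Int → Nat → Int × PySem.Dict (Nat × Nat) Int) :
    ∀ (l : List Nat), (∀ i ∈ l, ∀ t m, P m → (g (t, m) i).1 = f t i ∧ P (g (t, m) i).2) →
    ∀ t m, P m → (l.foldl g (t, m)).1 = l.foldl f t ∧ P (l.foldl g (t, m)).2 := by
  intro l
  induction l with
  | nil => intro _ t m hm; exact ⟨rfl, hm⟩
  | cons i l IH =>
    intro h t m hm
    have hi := h i (by simp) t m hm
    simp only [List.foldl_cons]
    have : g (t, m) i = ((g (t, m) i).1, (g (t, m) i).2) := rfl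
    rw [this, hi.1]
    exact IH (fun j hj => h j (by simp [hj])) (f t i) (g (t, m) i).2 hi.2

theorem bRec_correct (cs : List Char) : ∀ fuel start e memo, e - start ≤ fuel → GoodMemo cs memo →
    (bRec cs fuel start e memo).1 = cnt cs start e ∧ GoodMemo cs (bRec cs fuel start e memo).2 := by
  intro fuel
  induction fuel with
  | zero =>
    intro start e memo h hg
    simp only [bRec]
    exact ⟨(cnt_of_le cs start e (by omega)).symm, hg⟩
  | succ fuel IH =>
    intro start e memo h hg
    by_cases h5 : e - start < 5
    · simp only [bRec, if_pos h5]
      exact ⟨(cnt_short cs (e - start) start e le_rfl h5).symm, hg⟩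
    · cases hget : memo.get? (start, e) with
      | some v =>
        simp only [bRec, if_neg h5, hget]
        exact ⟨hg start e v hget, hg⟩
      | none =>
        simp only [bRec, if_neg h5, hget]
        have hr1 := IH (start+1) e memo (by omega) hg
        have hfold := foldl_pair_good (GoodMemo cs)
          (fun t i => if pvPairs cs start i then t + cnt cs (start+1) i * cnt cs (i+1) e else t)
          (fun tm i =>
            if pvPairs cs start i then
              let ra := bRec cs fuel (start+1) i tm.2
              let rb := bRec cs fuel (i+1) e ra.2
              (tm.1 + ra.1 * rb.1, rb.2)
            else tm)
          (List.range' (start+4) (e - (start+4)))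
          (by
            intro i hi t m hm
            have hb := List.mem_range'_1.mp hi
            by_cases hp : pvPairs cs start i
            · have ha := IH (start+1) i m (by omega) hm
              have hbb := IH (i+1) e (bRec cs fuel (start+1) i m).2 (by omega) ha.2
              simp only [hp, if_true]
              exact ⟨by rw [ha.1, hbb.1], hbb.2⟩
            · simp only [hp]
              exact ⟨rfl, hm⟩)
        have hres := hfold (bRec cs fuel (start+1) e memo).1 (bRec cs fuel (start+1) e memo).2 hr1.2
        rw [Prod.mk.eta] at hres
        have hsum : List.foldl
            (fun t i => if pvPairs cs start i then t + cnt cs (start+1) i * cnt cs (i+1) e else t)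
            (bRec cs fuel (start+1) e memo).1 (List.range' (start+4) (e - (start+4))) = cnt cs start e := by
          rw [hr1.1, ← add_zero (cnt cs (start+1) e),
              foldl_if_add (List.range' (start+4) (e - (start+4))) (pvPairs cs start)
                (fun i => cnt cs (start+1) i * cnt cs (i+1) e) (cnt cs (start+1) e) 0]
          exact (cnt_unfold cs start e (by omega)).symm
        refine ⟨by rw [hres.1, hsum], ?_⟩
        intro st' e' v hv
        rw [PySem.Dict.get?_insert] at hv
        by_cases hk : (st', e') = (start, e)
        · rw [if_pos hk] at hv
          have hv' := (Option.some.inj hv).symm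
          obtain ⟨h1, h2⟩ := Prod.mk.inj hk
          subst h1; subst h2
          rw [hv', hres.1, hsum]
        · rw [if_neg hk] at hv
          exact hres.2 st' e' v hv

-- invariant for A's table: rows below e are finished, row e is finished from column k on,
-- everything else still holds the initial 1 (which equals cnt on trivial intervals)
def AInv (cs : List Char) (n e k : Nat) (memo : List (List Int)) : Prop :=
  memo.length = n+1 ∧ (∀ r ∈ memo, r.length = n+1) ∧
  ∀ E st, pvGet2 memo E st = if E < e ∨ (E = e ∧ k ≤ st) then cnt cs st E else 1

theorem getD_set_self (l : List (List Int)) (i : Nat) (a : List Int) (h : i < l.length) :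
    (l.set i a).getD i [] = a := by
  rw [List.getD_eq_getElem?_getD, List.getElem?_set_self h]; rfl

theorem getD_set_ne (l : List (List Int)) (i j : Nat) (a : List Int) (h : i ≠ j) :
    (l.set i a).getD j [] = l.getD j [] := by
  rw [List.getD_eq_getElem?_getD, List.getElem?_set_ne h, ← List.getD_eq_getElem?_getD]

theorem getD_set_self' (l : List Int) (i : Nat) (a : Int) (h : i < l.length) :
    (l.set i a).getD i 1 = a := by
  rw [List.getD_eq_getElem?_getD, List.getElem?_set_self h]; rfl

theorem getD_set_ne' (l : List Int) (i j : Nat) (a : Int) (h : i ≠ j) :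
    (l.set i a).getD j 1 = l.getD j 1 := by
  rw [List.getD_eq_getElem?_getD, List.getElem?_set_ne h, ← List.getD_eq_getElem?_getD]

theorem AInv_step (cs : List Char) (n e start : Nat) (memo : List (List Int))
    (he : e ≤ n) (hs : start < e) (h : AInv cs n e (start+1) memo) :
    AInv cs n e start (pvRowStep cs e start memo) := by
  obtain ⟨hlen, hrows, hval⟩ := h
  have heL : e < memo.length := by omega
  have hrow : memo.getD e [] ∈ memo := by
    rw [List.getD_eq_getElem?_getD, List.getElem?_eq_getElem heL]
    exact Option.getD_some .. ▸ List.getElem_mem heL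
  have hrlen : (memo.getD e []).length = n+1 := hrows _ hrow
  have htot : (List.range' (start+4) (e - (start+4))).foldl
      (fun t i => if pvPairs cs start i then t + pvGet2 memo i (start+1) * pvGet2 memo e (i+1) else t)
      (pvGet2 memo e (start+1)) = cnt cs start e := by
    have hinit : pvGet2 memo e (start+1) = cnt cs (start+1) e := by
      rw [hval e (start+1), if_pos (Or.inr ⟨rfl, le_rfl⟩)]
    have hcong : (List.range' (start+4) (e - (start+4))).foldl
        (fun t i => if pvPairs cs start i then t + pvGet2 memo i (start+1) * pvGet2 memo e (i+1) else t)
        (pvGet2 memo e (start+1)) =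
        (List.range' (start+4) (e - (start+4))).foldl
        (fun t i => if pvPairs cs start i then t + cnt cs (start+1) i * cnt cs (i+1) e else t)
        (pvGet2 memo e (start+1)) := by
      apply PySem.List.foldl_congr_mem'
      intro i hi acc
      have hb := List.mem_range'_1.mp hi
      by_cases hp : pvPairs cs start i
      · simp only [hp, if_true]
        rw [hval i (start+1), if_pos (Or.inl (by omega)),
            hval e (i+1), if_pos (Or.inr ⟨rfl, by omega⟩)]
      · simp [hp]
    rw [hcong, hinit, ← add_zero (cnt cs (start+1) e),
        foldl_if_add (List.range' (start+4) (e - (start+4))) (pvPairs cs start)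
          (fun i => cnt cs (start+1) i * cnt cs (i+1) e) (cnt cs (start+1) e) 0]
    exact (cnt_unfold cs start e hs).symm
  unfold pvRowStep pvSet2
  rw [htot]
  refine ⟨by simp [hlen], ?_, ?_⟩
  · intro r hr
    rcases List.mem_or_eq_of_mem_set hr with hr' | hr'
    · exact hrows r hr'
    · rw [hr', List.length_set]; exact hrlen
  · intro E st
    unfold pvGet2
    by_cases hE : E = e
    · subst hE
      rw [getD_set_self memo E _ heL]
      by_cases hst : st = start
      · subst hst
        rw [getD_set_self' _ st _ (by omega)]
        rw [if_pos (Or.inr ⟨rfl, le_rfl⟩)]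
      · rw [getD_set_ne' _ start st _ (fun hh => hst hh.symm)]
        have := hval E st
        unfold pvGet2 at this
        rw [this]
        split_ifs with h1 h2 <;> first | rfl | omega
    · rw [getD_set_ne memo e E _ fun hh => hE hh.symm]
      have := hval E st
      unfold pvGet2 at this
      rw [this]
      split_ifs with h1 h2 <;> first | rfl | omega

theorem AInv_loop (cs : List Char) (n e : Nat) :
    ∀ k memo, k ≤ e → e ≤ n → AInv cs n e k memo → AInv cs n e 0 (pvRowLoop cs e k memo) := by
  intro k
  induction k with
  | zero => intro memo _ _ h; exact h
  | succ k IH =>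
    intro memo hk he h
    exact IH _ (by omega) he (AInv_step cs n e k memo he (by omega) h)

theorem AInv_shift (cs : List Char) (n e : Nat) (memo : List (List Int))
    (h : AInv cs n e 0 memo) : AInv cs n (e+1) (e+1) memo := by
  obtain ⟨hlen, hrows, hval⟩ := h
  refine ⟨hlen, hrows, ?_⟩
  intro E st
  rw [hval E st]
  split_ifs with h1 h2 h3
  · rfl
  · omega
  · exact (cnt_of_le cs st E (by omega)).symm
  · rfl

theorem getD_replicate {α : Type} (m : Nat) (r : α) (i : Nat) (d : α) :
    (List.replicate m r).getD i d = if i < m then r else d := by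
  rw [List.getD_eq_getElem?_getD, List.getElem?_replicate]; split <;> rfl

theorem AInv_init (cs : List Char) (n : Nat) :
    AInv cs n 0 0 (List.replicate (n+1) (List.replicate (n+1) (1 : Int))) := by
  refine ⟨by simp, by intro r hr; rw [List.eq_of_mem_replicate hr]; simp, ?_⟩
  intro E st
  have hget : pvGet2 (List.replicate (n+1) (List.replicate (n+1) (1 : Int))) E st = 1 := by
    unfold pvGet2
    rw [getD_replicate]
    split
    · rw [getD_replicate]; split <;> rfl
    · rfl
  rw [hget]
  split_ifs with h1
  · have hE : E = 0 := by omega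
    subst hE
    exact (cnt_of_le cs st 0 (by omega)).symm
  · rfl

theorem AInv_outer (cs : List Char) (n : Nat) : ∀ j, j ≤ n+1 →
    AInv cs n j j ((List.range j).foldl (fun m e => pvRowLoop cs e e m)
      (List.replicate (n+1) (List.replicate (n+1) (1 : Int)))) := by
  intro j
  induction j with
  | zero => intro _; exact AInv_init cs n
  | succ j IH =>
    intro hj
    rw [List.range_succ, List.foldl_append, List.foldl_cons, List.foldl_nil]
    exact AInv_shift cs n j _ (AInv_loop cs n j j _ le_rfl (by omega) (IH (by omega)))

theorem rnas_eq_cnt (s : String) : rnas s = cnt s.toList 0 s.toList.length := by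
  unfold rnas
  have h := AInv_outer s.toList s.toList.length (s.toList.length + 1) le_rfl
  rw [h.2.2 s.toList.length 0, if_pos (Or.inl (by omega))]

theorem rnas_alt_eq_cnt (s : String) : rnas_alt s = cnt s.toList 0 s.toList.length := by
  unfold rnas_alt
  exact (bRec_correct s.toList (s.toList.length + 1) 0 s.toList.length PySem.Dict.empty
    (by omega) (by intro st e v hv; simp [PySem.Dict.get?_empty] at hv)).1

-- ===== VERDICT (by name: the statement is the Claim_ definition above) =====
theorem rnas_spec : Claim_equal_rnas := by
  intro s _ _
  unfold Spec_rnas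
  rw [rnas_eq_cnt, rnas_alt_eq_cnt]
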